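-- pv_equiv track=rewrite | github.com/Dongckim/programmers_codingTest | 99클럽/문자열을 정수로 바꾸기.py | faster_solution
-- ===== SOURCE A (Python) =====
-- def faster_solution(str):
--     result = 0
--     size=len(str)
--     temp = 0
--     if str [0] == '-' :
--         sign = -1
--     else :
--         sign = 1
--
--     for i in range(0, size) :
--         if str[i] == '1' :
--             temp = 1
--         elif str[i] == '2' :
--             temp = 2
--         elif str[i] == '3' :
--             temp = 3
--         elif str[i] == '4' :
--             temp = 4
--         elif str[i] == '5' :
--             temp = 5
--         elif str[i] == '6' :
--             temp = 6
--         elif str[i] == '7' :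
--             temp = 7
--         elif str[i] == '8' :
--             temp = 8
--         elif str[i] == '9' :
--             temp = 9
--         else :
--             temp = 0
--         for i in range(size-i-1)  :
--             temp = temp * 10
--         result = result + temp
--     result = result * sign
--     return result
-- ===== SOURCE B (Python) =====
-- def faster_solution(str):
--     sign = -1 if str[0] == '-' else 1
--     acc = 0
--     for ch in str:
--         acc = acc * 10 + (ord(ch) - 48 if '0' <= ch <= '9' else 0)
--     return sign * acc
-- ===== Notes on version B (the rewrite author's own statement) =====
-- stated objective: faster
-- what changed: Replaced the per-character elif ladder plus an inner loop that re-multiplies each digit by 10 once per remaining position with a single Horner pass (acc = acc*10 + digit), so the inner loop disappears.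
import Mathlib
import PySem

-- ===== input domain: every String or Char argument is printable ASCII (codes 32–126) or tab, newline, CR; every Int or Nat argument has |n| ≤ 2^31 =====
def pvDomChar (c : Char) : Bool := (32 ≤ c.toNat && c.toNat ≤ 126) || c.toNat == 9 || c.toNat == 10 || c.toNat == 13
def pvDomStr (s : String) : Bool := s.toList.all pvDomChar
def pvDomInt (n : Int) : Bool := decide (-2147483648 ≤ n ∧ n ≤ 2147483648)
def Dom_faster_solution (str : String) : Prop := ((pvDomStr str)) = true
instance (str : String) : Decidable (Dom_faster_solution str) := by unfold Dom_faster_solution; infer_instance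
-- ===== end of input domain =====

-- B replaces A's quadratic per-digit rescaling loop by a single Horner pass (acc = acc*10 + digit); objective: faster (asymptotic O(n^2) → O(n)).

-- ===== PORT A =====
def faster_solution (str : String) : Int :=
  let l := str.toList
  let size : Int := (l.length : Int)
  let sign : Int := if PySem.Str.pyGet? str 0 = some '-' then -1 else 1
  let result : Int := (PySem.List.pyRange 0 size 1).foldl (fun result i =>
    let c := PySem.List.pyGetD l i ' '
    let temp : Int :=
      if c = '1' then 1 else if c = '2' then 2 else if c = '3' then 3
      else if c = '4' then 4 else if c = '5' then 5 else if c = '6' then 6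
      else if c = '7' then 7 else if c = '8' then 8 else if c = '9' then 9 else 0
    let temp := (PySem.List.pyRange 0 (size - i - 1) 1).foldl (fun t _ => t * 10) temp
    result + temp) 0
  result * sign

-- ===== PORT B =====
def faster_solution_alt (str : String) : Int :=
  let sign : Int := if PySem.Str.pyGet? str 0 = some '-' then -1 else 1
  let acc : Int := str.toList.foldl (fun acc ch =>
    acc * 10 + (if '0' ≤ ch ∧ ch ≤ '9' then (ch.toNat : Int) - 48 else 0)) 0
  sign * acc

-- ===== PRECONDITION & SPEC =====
-- Pre_ excludes only the empty string, on which Python's `str[0]` raises IndexError.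
def Pre_faster_solution (str : String) : Prop := str.toList ≠ []
instance (str : String) : Decidable (Pre_faster_solution str) := by unfold Pre_faster_solution; infer_instance
def pvWitness_faster_solution : String := "-37"

def Spec_faster_solution (str : String) (out : Int) : Prop := out = faster_solution_alt str
instance (str : String) (out : Int) : Decidable (Spec_faster_solution str out) := by unfold Spec_faster_solution; infer_instance

-- ===== CLAIM (what is proved, stated in full; the proofs are below) =====
def Claim_equal_faster_solution : Prop := ∀ (str : String), Dom_faster_solution str → Pre_faster_solution str → Spec_faster_solution str (faster_solution str)

-- ===== LEMMAS AND PROOFS =====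

-- A's elif ladder (digA) and B's range test (digB) as proof-side helpers
def digA (c : Char) : Int :=
  if c = '1' then 1 else if c = '2' then 2 else if c = '3' then 3
  else if c = '4' then 4 else if c = '5' then 5 else if c = '6' then 6
  else if c = '7' then 7 else if c = '8' then 8 else if c = '9' then 9 else 0

def digB (c : Char) : Int := if '0' ≤ c ∧ c ≤ '9' then (c.toNat : Int) - 48 else 0

lemma char_eq_iff (c d : Char) : c = d ↔ c.toNat = d.toNat := by
  constructor
  · rintro rfl; rfl
  · intro h; exact Char.ofNat_toNat c ▸ Char.ofNat_toNat d ▸ congrArg Char.ofNat h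

lemma char_le_iff (c d : Char) : c ≤ d ↔ c.toNat ≤ d.toNat := Iff.rfl

lemma dig_eq (c : Char) : digA c = digB c := by
  unfold digA digB
  simp only [char_eq_iff, char_le_iff]
  by_cases h : 48 ≤ c.toNat ∧ c.toNat ≤ 57
  · obtain ⟨ha, hb⟩ := h
    interval_cases hc : c.toNat <;> simp_all
  · have : ∀ k : Nat, 49 ≤ k → k ≤ 57 → c.toNat ≠ k := by omega
    simp_all [show ('1':Char).toNat = 49 from rfl, show ('2':Char).toNat = 50 from rfl,
      show ('3':Char).toNat = 51 from rfl, show ('4':Char).toNat = 52 from rfl,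
      show ('5':Char).toNat = 53 from rfl, show ('6':Char).toNat = 54 from rfl,
      show ('7':Char).toNat = 55 from rfl, show ('8':Char).toNat = 56 from rfl,
      show ('9':Char).toNat = 57 from rfl, show ('0':Char).toNat = 48 from rfl]

lemma pow_fold (n : Nat) (t : Int) :
    (PySem.List.pyRange 0 (n : Int) 1).foldl (fun t _ => t * 10) t = t * 10 ^ n := by
  rw [PySem.List.pyRange_one]
  simp only [Int.sub_zero, Int.toNat_natCast, List.foldl_map]
  induction n generalizing t with
  | zero => simp
  | succ m ih => rw [List.range_succ, List.foldl_append]; simp [ih]; ring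

-- positional value, the common form of both loops
def posVal (l : List Char) : Int :=
  ((List.range l.length).map (fun k => digB (l.getD k ' ') * 10 ^ (l.length - 1 - k))).sum

lemma a_fold_eq_sum (l : List Char) (dg : Char → Int) :
    (PySem.List.pyRange 0 (l.length : Int) 1).foldl (fun r i =>
      r + (PySem.List.pyRange 0 ((l.length : Int) - i - 1) 1).foldl (fun t _ => t * 10)
            (dg (PySem.List.pyGetD l i ' '))) 0
    = ((List.range l.length).map (fun k => dg (l.getD k ' ') * 10 ^ (l.length - 1 - k))).sum := by
  rw [PySem.List.pyRange_one]
  simp only [Int.sub_zero, Int.toNat_natCast, List.foldl_map]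
  rw [PySem.List.foldl_congr_mem (List.range l.length) _
    (fun r (k : Nat) => r + dg (l.getD k ' ') * 10 ^ (l.length - 1 - k)) 0 ?_]
  · rw [PySem.List.foldl_add]; simp
  · intro acc k hk
    rw [List.mem_range] at hk
    have h1 : (0 : Int) + (k : Int) = (k : Int) := by ring
    rw [h1, PySem.List.pyGetD_natCast,
      show (l.length : Int) - (k : Int) - 1 = ((l.length - 1 - k : Nat) : Int) by omega,
      pow_fold]

lemma a_fold_eq_posVal (l : List Char) :
    (PySem.List.pyRange 0 (l.length : Int) 1).foldl (fun r i =>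
      r + (PySem.List.pyRange 0 ((l.length : Int) - i - 1) 1).foldl (fun t _ => t * 10)
            (digA (PySem.List.pyGetD l i ' '))) 0 = posVal l := by
  rw [a_fold_eq_sum l digA]
  unfold posVal
  exact congrArg _ (List.map_congr_left (fun k _ => by rw [dig_eq]))

lemma posVal_eq_horner (l : List Char) :
    posVal l = l.foldl (fun acc c =>
      acc * 10 + (if '0' ≤ c ∧ c ≤ '9' then (c.toNat : Int) - 48 else 0)) 0 := by
  have hfold : l.foldl (fun acc c =>
      acc * 10 + (if '0' ≤ c ∧ c ≤ '9' then (c.toNat : Int) - 48 else 0)) 0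
      = l.foldl (fun acc c => acc * 10 + digB c) 0 := rfl
  rw [hfold]
  clear hfold
  induction l using List.reverseRecOn with
  | nil => simp [posVal]
  | append_singleton t c ih =>
    rw [List.foldl_append]
    simp only [List.foldl_cons, List.foldl_nil]
    rw [← ih]
    unfold posVal
    simp only [List.length_append, List.length_singleton]
    rw [List.range_succ, List.map_append, List.sum_append]
    have hmap : (List.range t.length).map
        (fun k => digB ((t ++ [c]).getD k ' ') * 10 ^ (t.length + 1 - 1 - k))
        = (List.range t.length).map
        (fun k => (digB (t.getD k ' ') * 10 ^ (t.length - 1 - k)) * 10) := by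
      apply List.map_congr_left
      intro k hk
      rw [List.mem_range] at hk
      rw [show (t ++ [c]).getD k ' ' = t.getD k ' ' by
            simp [List.getD, List.getElem?_append_left hk],
          show t.length + 1 - 1 - k = (t.length - 1 - k) + 1 by omega]
      ring
    rw [hmap, List.sum_map_mul_right]
    simp

-- ===== VERDICT (by name: the statement is the Claim_ definition above) =====
theorem faster_solution_spec : Claim_equal_faster_solution := by
  intro str _ _
  show faster_solution str = faster_solution_alt str
  unfold faster_solution faster_solution_alt
  simp only []
  rw [show (fun (result : Int) (i : Int) =>
      let c := PySem.List.pyGetD str.toList i ' '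
      let temp : Int :=
        if c = '1' then 1 else if c = '2' then 2 else if c = '3' then 3
        else if c = '4' then 4 else if c = '5' then 5 else if c = '6' then 6
        else if c = '7' then 7 else if c = '8' then 8 else if c = '9' then 9 else 0
      let temp := (PySem.List.pyRange 0 ((str.toList.length : Int) - i - 1) 1).foldl (fun t _ => t * 10) temp
      result + temp) = (fun (r : Int) (i : Int) =>
      r + (PySem.List.pyRange 0 ((str.toList.length : Int) - i - 1) 1).foldl (fun t _ => t * 10)
            (digA (PySem.List.pyGetD str.toList i ' '))) from rfl]
  rw [a_fold_eq_posVal, posVal_eq_horner]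
  ring
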